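-- pv_equiv track=rewrite | github.com/gourav-sharma1857/cipher-spry-backend | patterns.py | index_square_mod_26
-- ===== SOURCE A (Python) =====
-- MOD_26 = 26 # Constant for modulo 26, used for wrapping around the alphabet (A-Z)
--
-- ASCII_A_UPPER = ord('A') # ASCII value of 'A' (65), used as a base for character-to-index conversion
--
-- def index_square_mod_26(word: str) -> str: # Pattern: squares each letter's alphabetical index, then wraps around alphabet
--     """Square each letter’s index, take mod 26, map to a letter."""
--     if len(word) != 5: return word # Only apply if word is 5 characters long
--     transformed = [] # Initialize an empty list
--     for char in word: # Iterate through each character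
--         if 'A' <= char <= 'Z': # Check if it's an uppercase letter
--             original_index = ord(char) - ASCII_A_UPPER # Get 0-25 index
--             transformed_index = (original_index * original_index) % MOD_26 # Square the index and apply modulo 26
--             transformed.append(chr(ASCII_A_UPPER + transformed_index)) # Convert back to character
--         else: # If not a letter, append unchanged
--             transformed.append(char)
--     return "".join(transformed) # Join the list of characters
-- ===== SOURCE B (Python) =====
-- # Precompute the squared alphabet once: position i holds chr(65 + (i*i) % 26).
-- _SQ_ALPHABET = "".join(chr(65 + (i * i) % 26) for i in range(26))
--
-- def _transform(s: str) -> str: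
--     """Recursively rebuild the string, substituting uppercase letters
--     from the precomputed squared alphabet."""
--     if not s:
--         return ""
--     c = s[0]
--     head = _SQ_ALPHABET[ord(c) - 65] if 'A' <= c <= 'Z' else c
--     return head + _transform(s[1:])
--
-- def index_square_mod_26(word: str) -> str:
--     if len(word) != 5:
--         return word
--     return _transform(word)
-- ===== Notes on version B (the rewrite author's own statement) =====
-- stated objective: alternative
-- what changed: Replaces A's imperative loop with arithmetic per character by a recursive decomposition over the string that indexes into a 26-letter squared-alphabet string precomputed once at module level.
import Mathlib
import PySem

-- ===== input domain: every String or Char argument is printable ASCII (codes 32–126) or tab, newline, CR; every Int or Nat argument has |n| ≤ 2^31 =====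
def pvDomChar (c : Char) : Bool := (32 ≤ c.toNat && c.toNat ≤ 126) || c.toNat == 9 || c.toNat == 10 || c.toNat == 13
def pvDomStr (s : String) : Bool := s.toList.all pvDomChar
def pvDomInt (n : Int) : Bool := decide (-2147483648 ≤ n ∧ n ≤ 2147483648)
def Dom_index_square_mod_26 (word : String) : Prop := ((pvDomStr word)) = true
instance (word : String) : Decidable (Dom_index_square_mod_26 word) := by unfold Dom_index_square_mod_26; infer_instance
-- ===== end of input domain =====

-- B replaces A's imperative accumulator loop with per-character arithmetic by a recursive
-- decomposition over the string indexing a squared-alphabet string precomputed once; objective: alternative.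

-- ===== PORT A =====
def index_square_mod_26 (word : String) : String :=
  if PySem.Str.len word ≠ 5 then word
  else
    let transformed := word.toList.foldl (fun acc char =>
      if 'A' ≤ char ∧ char ≤ 'Z' then
        let original_index : Int := (char.toNat : Int) - 65
        let transformed_index : Int := PySem.Int.mod (original_index * original_index) 26
        acc ++ [Char.ofNat ((65 : Int) + transformed_index).toNat]
      else
        acc ++ [char]) []
    String.ofList transformed

-- ===== PORT B =====
-- _SQ_ALPHABET = "".join(chr(65 + (i*i) % 26) for i in range(26))
def pvSQAlphabet : List Char := (List.range 26).map (fun i => Char.ofNat (65 + (i * i) % 26))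

-- _transform: recursion on the string (s[0] / s[1:]); _SQ_ALPHABET[ord(c)-65] is always
-- in range under the 'A' ≤ c ≤ 'Z' guard, so the .getD default is never reached.
def pvTransform : List Char → List Char
  | [] => []
  | c :: rest =>
      (if 'A' ≤ c ∧ c ≤ 'Z' then (PySem.List.pyGet? pvSQAlphabet ((c.toNat : Int) - 65)).getD c else c)
        :: pvTransform rest

def index_square_mod_26_alt (word : String) : String :=
  if PySem.Str.len word ≠ 5 then word
  else String.ofList (pvTransform word.toList)

-- ===== PRECONDITION & SPEC =====
def Spec_index_square_mod_26 (word : String) (out : String) : Prop := out = index_square_mod_26_alt word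
instance (word : String) (out : String) : Decidable (Spec_index_square_mod_26 word out) := by unfold Spec_index_square_mod_26; infer_instance

-- ===== CLAIM =====
def Claim_equal_index_square_mod_26 : Prop := ∀ (word : String), Dom_index_square_mod_26 word → Spec_index_square_mod_26 word (index_square_mod_26 word)

-- ===== LEMMAS AND PROOFS =====

-- A's per-character transformation, as a function
def pvStepA (char : Char) : Char :=
  if 'A' ≤ char ∧ char ≤ 'Z' then
    Char.ofNat ((65 : Int) + PySem.Int.mod (((char.toNat : Int) - 65) * ((char.toNat : Int) - 65)) 26).toNat
  else char

-- B's per-character transformation, as a function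
def pvStepB (c : Char) : Char :=
  if 'A' ≤ c ∧ c ≤ 'Z' then (PySem.List.pyGet? pvSQAlphabet ((c.toNat : Int) - 65)).getD c else c

theorem pvTransform_eq_map (s : List Char) : pvTransform s = s.map pvStepB := by
  induction s with
  | nil => rfl
  | cons c rest ih => simp [pvTransform, pvStepB, ih]

-- the two per-character maps agree on every character with code < 127 (all of Dom)
theorem pvStep_agree : ∀ n < 127, pvStepA (Char.ofNat n) = pvStepB (Char.ofNat n) := by
  decide

theorem pvStep_agree' (c : Char) (h : pvDomChar c = true) : pvStepA c = pvStepB c := by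
  have hlt : c.toNat < 127 := by
    simp [pvDomChar] at h
    omega
  have := pvStep_agree c.toNat hlt
  simpa [Char.ofNat_toNat] using this

theorem index_square_mod_26_spec : Claim_equal_index_square_mod_26 := by
  intro word hdom
  unfold Spec_index_square_mod_26 index_square_mod_26 index_square_mod_26_alt
  by_cases hlen : PySem.Str.len word = 5
  case neg => rw [if_pos hlen, if_pos hlen]
  case pos =>
    rw [if_neg (not_not_intro hlen), if_neg (not_not_intro hlen)]
    rw [pvTransform_eq_map]
    have hfold : word.toList.foldl (fun acc char =>
        if 'A' ≤ char ∧ char ≤ 'Z' then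
          acc ++ [Char.ofNat ((65 : Int) + PySem.Int.mod (((char.toNat : Int) - 65) * ((char.toNat : Int) - 65)) 26).toNat]
        else acc ++ [char]) [] = word.toList.map pvStepA := by
      have hstep : (fun (acc : List Char) (char : Char) =>
          if 'A' ≤ char ∧ char ≤ 'Z' then
            acc ++ [Char.ofNat ((65 : Int) + PySem.Int.mod (((char.toNat : Int) - 65) * ((char.toNat : Int) - 65)) 26).toNat]
          else acc ++ [char]) = fun acc char => acc ++ [pvStepA char] := by
        funext acc char
        by_cases h : 'A' ≤ char ∧ char ≤ 'Z' <;> simp [pvStepA, h]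
      rw [hstep, PySem.List.foldl_append_singleton_eq_map]
      simp
    rw [hfold]
    refine congrArg String.ofList (List.map_congr_left ?_)
    intro c hc
    have hdc : pvDomChar c = true := by
      have := hdom
      unfold Dom_index_square_mod_26 pvDomStr at this
      exact List.all_eq_true.mp this c hc
    exact pvStep_agree' c hdc
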